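-- pv_equiv track=rewrite | github.com/dufis1/operator | pipeline/audio.py | _is_repetition_hallucination
-- ===== SOURCE A (Python) =====
-- def _is_repetition_hallucination(text):
--     """Detect Whisper hallucinations that repeat a word/phrase many times."""
--     words = text.lower().split()
--     if len(words) <= 10:
--         return False
--     from collections import Counter
--     # Check unigrams
--     counts = Counter(words)
--     if counts.most_common(1)[0][1] / len(words) > 0.5:
--         return True
--     # Check bigrams (catches "I know I know I know...")
--     bigrams = [f"{words[i]} {words[i+1]}" for i in range(len(words) - 1)]
--     if bigrams:
--         bcounts = Counter(bigrams)
--         if bcounts.most_common(1)[0][1] / len(bigrams) > 0.5: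
--             return True
--     return False
-- ===== SOURCE B (Python) =====
-- def _is_repetition_hallucination(text):
--     """Sort-and-scan variant: the highest frequency of a word (or bigram)
--     equals the longest run of equal consecutive elements in the sorted list."""
--     words = text.lower().split()
--     n = len(words)
--     if n <= 10:
--         return False
--
--     def longest_run(items):
--         best = 0
--         cur = 0
--         prev = None
--         for x in sorted(items):
--             cur = cur + 1 if x == prev else 1
--             prev = x
--             if cur > best:
--                 best = cur
--         return best
--
--     if 2 * longest_run(words) > n:
--         return True
--     bigrams = [words[i] + " " + words[i + 1] for i in range(n - 1)]
--     if 2 * longest_run(bigrams) > len(bigrams):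
--         return True
--     return False
-- ===== Notes on version B (the rewrite author's own statement) =====
-- stated objective: alternative
-- what changed: Replaces the Counter frequency table by sort-and-scan: the word (bigram) list is sorted and a single pass finds the longest run of equal consecutive elements, which equals the maximum frequency; same guards and >0.5 thresholds.
import Mathlib
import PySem

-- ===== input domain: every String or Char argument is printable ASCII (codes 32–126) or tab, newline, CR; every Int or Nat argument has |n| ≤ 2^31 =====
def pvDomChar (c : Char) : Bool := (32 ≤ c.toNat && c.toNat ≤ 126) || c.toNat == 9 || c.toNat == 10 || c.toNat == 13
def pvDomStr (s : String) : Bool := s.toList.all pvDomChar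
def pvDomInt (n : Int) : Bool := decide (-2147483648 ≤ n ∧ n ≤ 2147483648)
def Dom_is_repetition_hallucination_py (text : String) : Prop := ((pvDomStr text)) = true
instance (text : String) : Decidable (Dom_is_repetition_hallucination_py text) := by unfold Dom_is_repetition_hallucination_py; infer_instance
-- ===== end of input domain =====

-- B replaces A's Counter frequency table by sort-and-scan: the maximum frequency of a word
-- (bigram) equals the longest run of equal consecutive elements of the sorted list, found in one
-- pass; same guards and thresholds, same return value.

-- ===== PORT A =====
-- `counts.most_common(1)[0][1]` is the count of the first maximal item: `max?` returns the first
-- extremal element (Counter.most_common's stable descending sort puts it first); only its count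
-- is used.  `c / len > 0.5` on Python floats is exactly `2*c > len` for these list lengths
-- (the quotient differs from 0.5 by at least 1/(2*len), far above double rounding error).
-- `words[i]` is always in range here, so `pyGetD _ _ ""` never takes its default.
def is_repetition_hallucination_py (text : String) : Bool :=
  let words := PySem.Str.split₀ (PySem.Str.lower text)
  if words.length ≤ 10 then
    false
  else
    let counts := PySem.Dict.counter words
    if 2 * (((PySem.List.max? counts.items (fun p => p.2)).map (fun p => p.2)).getD 0) > (words.length : Int) then
      true
    else
      let bigrams := (PySem.List.pyRange 0 ((words.length : Int) - 1) 1).map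
        (fun i => PySem.Str.join " " [PySem.List.pyGetD words i "", PySem.List.pyGetD words (i + 1) ""])
      if bigrams ≠ [] then
        let bcounts := PySem.Dict.counter bigrams
        if 2 * (((PySem.List.max? bcounts.items (fun p => p.2)).map (fun p => p.2)).getD 0) > (bigrams.length : Int) then
          true
        else false
      else false

-- ===== PORT B =====
-- one loop step of B's longest-run scan: state = (best, cur, prev)
def pvStep (s : Nat × Nat × Option String) (x : String) : Nat × Nat × Option String :=
  let cur := if some x = s.2.2 then s.2.1 + 1 else 1
  (if cur > s.1 then cur else s.1, cur, some x)

-- B's `longest_run`: fold the scan over `sorted(items)` starting from best=0, cur=0, prev=None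
def pvLongestRun (items : List String) : Nat :=
  ((PySem.List.sorted items (fun x => x) false).foldl pvStep (0, 0, none)).1

-- best/cur are counts, so they are ported as Nat and cast to Int for the `>` comparison;
-- `words[i] + " " + words[i+1]` is ported as `PySem.Str.join " " [·, ·]` (Lean's own
-- String.append is opaque to the kernel).
def is_repetition_hallucination_py_alt (text : String) : Bool :=
  let words := PySem.Str.split₀ (PySem.Str.lower text)
  let n := words.length
  if n ≤ 10 then
    false
  else if 2 * (pvLongestRun words : Int) > (n : Int) then
    true
  else
    let bigrams := (PySem.List.pyRange 0 ((n : Int) - 1) 1).map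
      (fun i => PySem.Str.join " " [PySem.List.pyGetD words i "", PySem.List.pyGetD words (i + 1) ""])
    if 2 * (pvLongestRun bigrams : Int) > (bigrams.length : Int) then
      true
    else false

-- ===== PRECONDITION & SPEC =====
def Spec_is_repetition_hallucination_py (text : String) (out : Bool) : Prop := out = is_repetition_hallucination_py_alt text
instance (text : String) (out : Bool) : Decidable (Spec_is_repetition_hallucination_py text out) := by unfold Spec_is_repetition_hallucination_py; infer_instance

-- ===== CLAIM (what is proved, stated in full; the proofs are below) =====
def Claim_equal_is_repetition_hallucination_py : Prop := ∀ (text : String), Dom_is_repetition_hallucination_py text → Spec_is_repetition_hallucination_py text (is_repetition_hallucination_py text)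

-- ===== LEMMAS AND PROOFS =====

-- the maximum multiplicity of an element of ys
def pvMaxCnt (ys : List String) : Nat := (ys.map (fun w => ys.count w)).foldr max 0

-- A's "count of the most common element exceeds N/2" is "some element's count exceeds N/2".
theorem pv_maxcount_iff_any {xs : List String} (hne : xs ≠ []) (N : Int) :
    (2 * (((PySem.List.max? (PySem.Dict.counter xs).items (fun p => p.2)).map (fun p => p.2)).getD 0) > N)
      ↔ xs.any (fun w => 2 * (PySem.List.count xs w : Int) > N) = true := by
  have hitems := PySem.Dict.items_counter xs
  rcases hm : PySem.List.max? (PySem.Dict.counter xs).items (fun p : String × Int => p.2) with _ | m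
  · rw [PySem.List.max?_eq_none_iff] at hm
    rw [hitems] at hm
    simp only [List.map_eq_nil_iff] at hm
    have hx : xs.head hne ∈ PySem.Set.ofList xs := (PySem.Set.mem_ofList xs _).mpr (List.head_mem hne)
    rw [hm] at hx
    simp at hx
  · have hmem := PySem.List.max?_mem hm
    have hmax := PySem.List.max?_isMax hm
    rw [hitems] at hmem
    simp only [List.mem_map] at hmem
    obtain ⟨k, hk, hkm⟩ := hmem
    constructor
    · intro h
      simp only [List.any_eq_true]
      refine ⟨k, (PySem.Set.mem_ofList xs k).mp hk, ?_⟩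
      simp only [PySem.List.count_eq, decide_eq_true_eq]
      simpa [← hkm] using h
    · intro h
      simp only [List.any_eq_true, PySem.List.count_eq, decide_eq_true_eq] at h
      obtain ⟨w, hw, hcnt⟩ := h
      have hwi : (w, (List.count w xs : Int)) ∈ (PySem.Dict.counter xs).items := by
        rw [hitems]
        exact List.mem_map.mpr ⟨w, (PySem.Set.mem_ofList xs w).mpr hw, rfl⟩
      have := hmax _ hwi
      simp only [Option.map_some, Option.getD_some]
      omega

-- each element of a Nat list is at most its foldr max 0
theorem pv_le_foldr_max {a : Nat} {l : List Nat} (h : a ∈ l) : a ≤ l.foldr max 0 := by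
  induction l with
  | nil => cases h
  | cons b t ih =>
    rcases List.mem_cons.mp h with rfl | h
    · exact Nat.le_max_left _ _
    · exact le_trans (ih h) (Nat.le_max_right _ _)

-- foldr max 0 of a nonempty Nat list is attained by some element
theorem pv_foldr_max_exists {l : List Nat} (h : l ≠ []) : ∃ a ∈ l, l.foldr max 0 ≤ a := by
  induction l with
  | nil => exact absurd rfl h
  | cons b t ih =>
    cases t with
    | nil => exact ⟨b, List.mem_singleton.mpr rfl, by simp⟩
    | cons c r =>
      obtain ⟨a, ha, hle⟩ := ih (by simp)
      have hfold : ((b :: c :: r).foldr max 0) = max b ((c :: r).foldr max 0) := rfl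
      by_cases hb : (c :: r).foldr max 0 ≤ b
      · exact ⟨b, List.mem_cons_self, by rw [hfold]; omega⟩
      · exact ⟨a, List.mem_cons_of_mem _ ha, by rw [hfold]; omega⟩

theorem pvMaxCnt_count_le {v : String} {ys : List String} (h : v ∈ ys) :
    ys.count v ≤ pvMaxCnt ys :=
  pv_le_foldr_max (List.mem_map.mpr ⟨v, h, rfl⟩)

theorem pvMaxCnt_exists {ys : List String} (h : ys ≠ []) :
    ∃ w ∈ ys, pvMaxCnt ys ≤ ys.count w := by
  obtain ⟨a, ha, hle⟩ := pv_foldr_max_exists (l := ys.map (fun w => ys.count w))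
    (by simpa using h)
  obtain ⟨w, hw, rfl⟩ := List.mem_map.mp ha
  exact ⟨w, hw, hle⟩

-- maximum multiplicity of a block of k copies of x followed by a list avoiding x
theorem pvMaxCnt_decomp {x : String} {k : Nat} {rest : List String}
    (hk : 1 ≤ k) (hx : x ∉ rest) :
    pvMaxCnt (List.replicate k x ++ rest) = max k (pvMaxCnt rest) := by
  have hcx : (List.replicate k x ++ rest).count x = k := by
    simp [List.count_append, List.count_eq_zero.mpr hx]
  have hcw : ∀ w ∈ rest, (List.replicate k x ++ rest).count w = rest.count w := by
    intro w hw
    have hwx : x ≠ w := fun h => hx (h ▸ hw)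
    rw [List.count_append, List.count_replicate]
    simp [hwx]
  have hne : List.replicate k x ++ rest ≠ [] := by
    intro h
    rcases List.append_eq_nil_iff.mp h with ⟨h1, _⟩
    have := congrArg List.length h1
    simp at this
    omega
  apply Nat.le_antisymm
  · rcases pvMaxCnt_exists hne with ⟨w, hw, hle⟩
    rcases List.mem_append.mp hw with hw | hw
    · have : w = x := List.eq_of_mem_replicate hw
      subst this
      rw [hcx] at hle
      omega
    · rw [hcw w hw] at hle
      exact le_trans hle (le_trans (pvMaxCnt_count_le hw) (Nat.le_max_right _ _))
  · apply Nat.max_le.mpr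
    refine ⟨?_, ?_⟩
    · have hmem : x ∈ List.replicate k x ++ rest := List.mem_append.mpr
        (Or.inl (List.mem_replicate.mpr ⟨by omega, rfl⟩))
      calc k = (List.replicate k x ++ rest).count x := hcx.symm
        _ ≤ _ := pvMaxCnt_count_le hmem
    · by_cases hrest : rest = []
      · subst hrest; simp [pvMaxCnt]
      · rcases pvMaxCnt_exists hrest with ⟨w, hw, hle⟩
        rw [← hcw w hw] at hle
        exact le_trans hle (pvMaxCnt_count_le (List.mem_append.mpr (Or.inr hw)))

-- folding the scan over k further copies of x extends the current run by k
theorem pv_fold_replicate (k : Nat) (x : String) :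
    ∀ B c : Nat, c ≤ B →
    (List.replicate k x).foldl pvStep (B, c, some x) = (max B (c + k), c + k, some x) := by
  induction k with
  | zero => intro B c h; simp [Nat.max_eq_left h]
  | succ k ih =>
    intro B c h
    rw [List.replicate_succ, List.foldl_cons]
    have hstep : pvStep (B, c, some x) x = (max B (c + 1), c + 1, some x) := by
      simp [pvStep, Nat.max_def]
      split_ifs <;> omega
    rw [hstep, ih _ _ (Nat.le_max_right _ _)]
    have h1 : max (max B (c + 1)) (c + 1 + k) = max B (c + (k + 1)) := by omega
    have h2 : c + 1 + k = c + (k + 1) := by omega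
    rw [h1, h2]

-- the scan over a sorted list computes the max of the initial best and the maximum multiplicity
theorem pv_fold_sorted : ∀ (n : Nat) (ys : List String), ys.length ≤ n →
    ys.Pairwise (· ≤ ·) →
    ∀ (B c : Nat) (p : Option String), c ≤ B → (∀ y, ys.head? = some y → p ≠ some y) →
    (ys.foldl pvStep (B, c, p)).1 = max B (pvMaxCnt ys) := by
  intro n
  induction n with
  | zero =>
    intro ys hlen _ B c p _ _
    have : ys = [] := List.length_eq_zero_iff.mp (Nat.le_zero.mp hlen)
    subst this; simp [pvMaxCnt]
  | succ n ih =>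
    intro ys hlen hsorted B c p hcB hp
    cases hys : ys with
    | nil => simp [pvMaxCnt]
    | cons x t =>
      subst hys
      -- split t into the copies of x at the front and the rest
      have hsplit : t.takeWhile (fun y => y == x) ++ t.dropWhile (fun y => y == x) = t :=
        List.takeWhile_append_dropWhile
      set t1 := t.takeWhile (fun y => y == x) with ht1def
      set rest := t.dropWhile (fun y => y == x) with hrest
      have ht1 : t1 = List.replicate t1.length x := by
        refine List.eq_replicate_iff.mpr ⟨rfl, fun b hb => ?_⟩
        have := List.mem_takeWhile_imp hb
        exact eq_of_beq this
      rcases List.pairwise_cons.mp hsorted with ⟨hxall, htsorted⟩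
      have hrestsub : rest.Sublist t := List.dropWhile_sublist _
      have hrestsorted : rest.Pairwise (· ≤ ·) := htsorted.sublist hrestsub
      have hxrest : x ∉ rest := by
        intro hmem
        have hrne : rest ≠ [] := List.ne_nil_of_mem hmem
        have hhead := List.head_dropWhile_not (fun y => y == x) (hrest ▸ hrne)
        obtain ⟨h0, r, hr⟩ := List.exists_cons_of_ne_nil hrne
        have hh0 : rest.head hrne = h0 := by simp [hr]
        rw [hh0] at hhead
        have hh0ne : h0 ≠ x := by
          intro h
          simp [h] at hhead
        have hh0le : h0 ≤ x := by
          rcases List.pairwise_cons.mp (hr ▸ hrestsorted) with ⟨hall, _⟩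
          have hx' : x ∈ r := by
            rcases List.mem_cons.mp (hr ▸ hmem) with h | h
            · exact absurd h.symm hh0ne
            · exact h
          exact hall x hx'
        have hxle : x ≤ h0 := hxall h0 (hrestsub.mem (by rw [hr]; exact List.mem_cons_self))
        exact hh0ne (le_antisymm hh0le hxle)
      -- rewrite the whole list as a block of copies of x followed by rest
      have hblock : x :: t = List.replicate (t1.length + 1) x ++ rest := by
        rw [List.replicate_succ, List.cons_append, ← ht1, hsplit]
      -- run the fold: the first step resets the run to 1
      have hp1 : p ≠ some x := hp x rfl
      have hstep1 : pvStep (B, c, p) x = (max B 1, 1, some x) := by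
        simp only [pvStep, if_neg (fun h : some x = p => hp1 h.symm)]
        have : (if 1 > B then 1 else B) = max B 1 := by
          rw [Nat.max_def]; split_ifs <;> omega
        rw [this]
      have hfold1 : (x :: t).foldl pvStep (B, c, p)
          = rest.foldl pvStep (max (max B 1) (1 + t1.length), 1 + t1.length, some x) := by
        rw [List.foldl_cons, hstep1]
        have : t = t1 ++ rest := hsplit.symm
        rw [this, List.foldl_append, ht1,
          pv_fold_replicate t1.length x (max B 1) 1 (Nat.le_max_right _ _)]
        simp
      have hlenrest : rest.length ≤ n := by
        have h1 : (x :: t).length = t1.length + 1 + rest.length := by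
          rw [hblock]; simp
        simp only [List.length_cons] at hlen h1
        omega
      have hprest : ∀ y, rest.head? = some y → (some x : Option String) ≠ some y := by
        intro y hy h
        have : y ∈ rest := List.mem_of_mem_head? hy
        exact hxrest (Option.some.inj h ▸ this)
      rw [hfold1, ih rest hlenrest hrestsorted _ _ _ (Nat.le_max_right _ _) hprest]
      rw [show pvMaxCnt (x :: t) = pvMaxCnt (List.replicate (t1.length + 1) x ++ rest) from
        congrArg pvMaxCnt hblock]
      rw [pvMaxCnt_decomp (by omega) hxrest]
      omega

-- B's threshold test equals "some element's count exceeds N/2"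
theorem pv_run_iff_any (xs : List String) (hne : xs ≠ []) (N : Int) :
    (2 * (pvLongestRun xs : Int) > N)
      ↔ xs.any (fun w => 2 * (PySem.List.count xs w : Int) > N) = true := by
  set ys := PySem.List.sorted xs (fun x => x) false with hys
  have hperm : ys.Perm xs := PySem.List.sorted_perm xs (fun x => x) false
  have hpw : ys.Pairwise (· ≤ ·) := PySem.List.sorted_pairwise xs (fun x => x)
  have hrun : pvLongestRun xs = pvMaxCnt ys := by
    unfold pvLongestRun
    rw [← hys, pv_fold_sorted ys.length ys le_rfl hpw 0 0 none le_rfl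
      (fun y _ h => by cases h)]
    simp
  have hcnt : ∀ w, List.count w ys = List.count w xs := fun w => hperm.count_eq w
  rw [hrun]
  constructor
  · intro h
    have hyne : ys ≠ [] := by
      intro h0
      rw [h0] at hperm
      exact hne hperm.symm.eq_nil
    obtain ⟨w, hw, hle⟩ := pvMaxCnt_exists hyne
    simp only [List.any_eq_true]
    refine ⟨w, hperm.mem_iff.mp hw, ?_⟩
    simp only [PySem.List.count_eq, decide_eq_true_eq]
    rw [← hcnt w]
    have : (pvMaxCnt ys : Int) ≤ (List.count w ys : Int) := by exact_mod_cast hle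
    omega
  · intro h
    simp only [List.any_eq_true, PySem.List.count_eq, decide_eq_true_eq] at h
    obtain ⟨w, hw, hgt⟩ := h
    have hle : List.count w ys ≤ pvMaxCnt ys := pvMaxCnt_count_le (hperm.mem_iff.mpr hw)
    rw [hcnt w] at hle
    have : (List.count w xs : Int) ≤ (pvMaxCnt ys : Int) := by exact_mod_cast hle
    omega

-- ===== VERDICT (by name: the statement is the Claim_ definition above) =====
theorem is_repetition_hallucination_py_spec : Claim_equal_is_repetition_hallucination_py := by
  intro text _
  unfold Spec_is_repetition_hallucination_py
  unfold is_repetition_hallucination_py is_repetition_hallucination_py_alt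
  dsimp only
  set words := PySem.Str.split₀ (PySem.Str.lower text) with hw
  by_cases hlen : words.length ≤ 10
  · rw [if_pos hlen, if_pos hlen]
  · rw [if_neg hlen, if_neg hlen]
    have hne : words ≠ [] := by
      intro h; rw [h] at hlen; simp at hlen
    have hiff := (pv_maxcount_iff_any hne ((words.length : Nat) : Int)).trans
      (pv_run_iff_any words hne ((words.length : Nat) : Int)).symm
    by_cases hrun : 2 * (pvLongestRun words : Int) > ((words.length : Nat) : Int)
    · rw [if_pos (hiff.mpr hrun), if_pos hrun]
    · rw [if_neg (fun h => hrun (hiff.mp h)), if_neg hrun]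
      set bigrams := (PySem.List.pyRange 0 (((words.length : Nat) : Int) - 1) 1).map
        (fun i => PySem.Str.join " " [PySem.List.pyGetD words i "", PySem.List.pyGetD words (i + 1) ""]) with hb
      have hbne : bigrams ≠ [] := by
        rw [hb]
        simp only [ne_eq, List.map_eq_nil_iff]
        rw [PySem.List.pyRange_one]
        simp only [List.map_eq_nil_iff, List.range_eq_nil]
        omega
      rw [if_pos hbne]
      have hiff2 := (pv_maxcount_iff_any hbne ((bigrams.length : Nat) : Int)).trans
        (pv_run_iff_any bigrams hbne ((bigrams.length : Nat) : Int)).symm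
      by_cases hb2 : 2 * (pvLongestRun bigrams : Int) > ((bigrams.length : Nat) : Int)
      · rw [if_pos (hiff2.mpr hb2), if_pos hb2]
      · rw [if_neg (fun h => hb2 (hiff2.mp h)), if_neg hb2]
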